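-- pv_equiv track=rewrite | github.com/tradeblock-beems/main-ai-apps-v2 | projects/email-csv-creation/generate_whos_hunting_csv.py | format_hunter_data_for_row
-- ===== SOURCE A (Python) =====
-- from typing import Dict, Any, List
--
-- def format_hunter_data_for_row(hunters: List[Dict[str, Any]]) -> Dict[str, Any]:
--     """
--     Flattens the list of up to 3 hunter dictionaries for a single CSV row.
--     """
--     flat_data = {}
--     for i, hunter in enumerate(hunters, 1):
--         flat_data[f'hunter{i}_username'] = hunter.get('hunter_username')
--         flat_data[f'hunter{i}_avatar'] = hunter.get('hunter_avatar_path')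
--         flat_data[f'hunter{i}_userid'] = hunter.get('hunter_user_id')
--         flat_data[f'hunter{i}_tradecount'] = hunter.get('hunter_trade_count')
--         flat_data[f'hunter{i}_offers7d'] = hunter.get('offers_for_product')
--         flat_data[f'hunter{i}_target1_name'] = hunter.get('target_product_name')
--         flat_data[f'hunter{i}_target1_image'] = hunter.get('target_product_image_path')
--     # Fill remaining hunter columns with nulls if fewer than 3 hunters were found
--     for i in range(len(hunters) + 1, 4):
--         flat_data[f'hunter{i}_username'] = None
--         flat_data[f'hunter{i}_avatar'] = None
--         flat_data[f'hunter{i}_userid'] = None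
--         flat_data[f'hunter{i}_tradecount'] = None
--         flat_data[f'hunter{i}_offers7d'] = None
--         flat_data[f'hunter{i}_target1_name'] = None
--         flat_data[f'hunter{i}_target1_image'] = None
--     return flat_data
-- ===== SOURCE B (Python) =====
-- FIELDS = [
--     ("username", "hunter_username"),
--     ("avatar", "hunter_avatar_path"),
--     ("userid", "hunter_user_id"),
--     ("tradecount", "hunter_trade_count"),
--     ("offers7d", "offers_for_product"),
--     ("target1_name", "target_product_name"),
--     ("target1_image", "target_product_image_path"),
-- ]
--
--
-- def format_hunter_data_for_row(hunters):
--     def rows(hs, i):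
--         if not hs:
--             if i > 3:
--                 return []
--             return [(f'hunter{i}_{s}', None) for s, _ in FIELDS] + rows(hs, i + 1)
--         return [(f'hunter{i}_{s}', hs[0].get(k)) for s, k in FIELDS] + rows(hs[1:], i + 1)
--     return dict(rows(hunters, 1))
-- ===== Notes on version B (the rewrite author's own statement) =====
-- stated objective: alternative
-- what changed: Replaces A's imperative two-loop dict mutation (enumerate loop plus a None-fill loop with seven hardcoded assignments each) with a recursive function that builds the whole row as a flat list of (key, value) pairs from a field table, consuming the hunter list structurally and padding by recursing on the counter, then converts the pair list with a single dict() call.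
import Mathlib
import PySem

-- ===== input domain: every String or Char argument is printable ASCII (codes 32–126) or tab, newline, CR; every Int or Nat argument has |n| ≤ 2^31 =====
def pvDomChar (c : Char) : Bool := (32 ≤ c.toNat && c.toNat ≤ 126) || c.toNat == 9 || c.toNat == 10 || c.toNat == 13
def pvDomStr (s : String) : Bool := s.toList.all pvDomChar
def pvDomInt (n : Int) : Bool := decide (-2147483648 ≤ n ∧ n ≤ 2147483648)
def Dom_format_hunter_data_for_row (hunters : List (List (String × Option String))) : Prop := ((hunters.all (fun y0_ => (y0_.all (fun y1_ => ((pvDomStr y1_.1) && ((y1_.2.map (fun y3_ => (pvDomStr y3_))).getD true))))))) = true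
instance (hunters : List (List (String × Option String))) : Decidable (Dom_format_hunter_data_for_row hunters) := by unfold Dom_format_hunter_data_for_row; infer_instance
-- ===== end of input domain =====

-- B builds the row as a flat (key, value) pair list by structural recursion over the hunter
-- list (padding by recursing on the counter) and converts it with one dict() call, instead of
-- A's two imperative dict-mutation loops (objective: alternative decomposition).

-- ===== PORT A =====
def format_hunter_data_for_row (hunters : List (List (String × Option String))) : List (String × Option String) :=
  let flat1 : PySem.Dict String (Option String) :=
    (PySem.List.enumerate hunters 1).foldl (fun flat_data p =>
      let hunter : PySem.Dict String (Option String) := PySem.Dict.ofList p.2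
      (((((((flat_data.insert ("hunter" ++ PySem.Int.toStr p.1 ++ "_username") (hunter.getD "hunter_username" none)).insert
        ("hunter" ++ PySem.Int.toStr p.1 ++ "_avatar") (hunter.getD "hunter_avatar_path" none)).insert
        ("hunter" ++ PySem.Int.toStr p.1 ++ "_userid") (hunter.getD "hunter_user_id" none)).insert
        ("hunter" ++ PySem.Int.toStr p.1 ++ "_tradecount") (hunter.getD "hunter_trade_count" none)).insert
        ("hunter" ++ PySem.Int.toStr p.1 ++ "_offers7d") (hunter.getD "offers_for_product" none)).insert
        ("hunter" ++ PySem.Int.toStr p.1 ++ "_target1_name") (hunter.getD "target_product_name" none)).insert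
        ("hunter" ++ PySem.Int.toStr p.1 ++ "_target1_image") (hunter.getD "target_product_image_path" none)))
      PySem.Dict.empty
  let flat2 : PySem.Dict String (Option String) :=
    (PySem.List.pyRange ((hunters.length : Int) + 1) 4).foldl (fun flat_data i =>
      (((((((flat_data.insert ("hunter" ++ PySem.Int.toStr i ++ "_username") none).insert
        ("hunter" ++ PySem.Int.toStr i ++ "_avatar") none).insert
        ("hunter" ++ PySem.Int.toStr i ++ "_userid") none).insert
        ("hunter" ++ PySem.Int.toStr i ++ "_tradecount") none).insert
        ("hunter" ++ PySem.Int.toStr i ++ "_offers7d") none).insert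
        ("hunter" ++ PySem.Int.toStr i ++ "_target1_name") none).insert
        ("hunter" ++ PySem.Int.toStr i ++ "_target1_image") none))
      flat1
  flat2.items

-- ===== PORT B =====
def pvFields : List (String × String) :=
  [("username", "hunter_username"),
   ("avatar", "hunter_avatar_path"),
   ("userid", "hunter_user_id"),
   ("tradecount", "hunter_trade_count"),
   ("offers7d", "offers_for_product"),
   ("target1_name", "target_product_name"),
   ("target1_image", "target_product_image_path")]

/-- Source B's inner `rows` helper: builds the whole row as a flat pair list by recursion. -/
def pvRows (hs : List (List (String × Option String))) (i : Int) : List (String × Option String) :=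
  match hs with
  | [] =>
    if i > 3 then []
    else
      (pvFields.map (fun f => ("hunter" ++ PySem.Int.toStr i ++ "_" ++ f.1, (none : Option String))))
        ++ pvRows [] (i + 1)
  | h :: t =>
    (pvFields.map (fun f =>
        ("hunter" ++ PySem.Int.toStr i ++ "_" ++ f.1, (PySem.Dict.ofList h).getD f.2 none)))
      ++ pvRows t (i + 1)
termination_by hs.length + (4 - i).toNat
decreasing_by all_goals simp_all; omega

def format_hunter_data_for_row_alt (hunters : List (List (String × Option String))) : List (String × Option String) :=
  (PySem.Dict.ofList (pvRows hunters 1)).items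

-- ===== PRECONDITION & SPEC =====
def Spec_format_hunter_data_for_row (hunters : List (List (String × Option String))) (out : List (String × Option String)) : Prop := out = format_hunter_data_for_row_alt hunters
instance (hunters : List (List (String × Option String))) (out : List (String × Option String)) : Decidable (Spec_format_hunter_data_for_row hunters out) := by unfold Spec_format_hunter_data_for_row; infer_instance

-- ===== CLAIM (what is proved, stated in full; the proofs are below) =====
def Claim_equal_format_hunter_data_for_row : Prop := ∀ (hunters : List (List (String × Option String))), Dom_format_hunter_data_for_row hunters → Spec_format_hunter_data_for_row hunters (format_hunter_data_for_row hunters)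

-- ===== LEMMAS AND PROOFS =====

/-- The seven inserts A performs for slot `i` with source dict `src`. -/
def pvStep (fd : PySem.Dict String (Option String)) (i : Int)
    (src : PySem.Dict String (Option String)) : PySem.Dict String (Option String) :=
  (((((((fd.insert ("hunter" ++ PySem.Int.toStr i ++ "_username") (src.getD "hunter_username" none)).insert
    ("hunter" ++ PySem.Int.toStr i ++ "_avatar") (src.getD "hunter_avatar_path" none)).insert
    ("hunter" ++ PySem.Int.toStr i ++ "_userid") (src.getD "hunter_user_id" none)).insert
    ("hunter" ++ PySem.Int.toStr i ++ "_tradecount") (src.getD "hunter_trade_count" none)).insert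
    ("hunter" ++ PySem.Int.toStr i ++ "_offers7d") (src.getD "offers_for_product" none)).insert
    ("hunter" ++ PySem.Int.toStr i ++ "_target1_name") (src.getD "target_product_name" none)).insert
    ("hunter" ++ PySem.Int.toStr i ++ "_target1_image") (src.getD "target_product_image_path" none))

/-- Inserting one of B's seven-pair blocks (non-empty source) is one `pvStep`. -/
theorem pvBlock (fd : PySem.Dict String (Option String)) (i : Int)
    (src : PySem.Dict String (Option String)) :
    (pvFields.map (fun f =>
        ("hunter" ++ PySem.Int.toStr i ++ "_" ++ f.1, src.getD f.2 none))).foldl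
      (fun d p => d.insert p.1 p.2) fd
    = pvStep fd i src := by
  simp only [pvFields, List.map, List.foldl, pvStep, String.append_assoc,
    show ("_" ++ "username" : String) = "_username" from rfl,
    show ("_" ++ "avatar" : String) = "_avatar" from rfl,
    show ("_" ++ "userid" : String) = "_userid" from rfl,
    show ("_" ++ "tradecount" : String) = "_tradecount" from rfl,
    show ("_" ++ "offers7d" : String) = "_offers7d" from rfl,
    show ("_" ++ "target1_name" : String) = "_target1_name" from rfl,
    show ("_" ++ "target1_image" : String) = "_target1_image" from rfl]

/-- Inserting one of B's None blocks is one `pvStep` with the empty source. -/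
theorem pvBlockNone (fd : PySem.Dict String (Option String)) (i : Int) :
    (pvFields.map (fun f =>
        ("hunter" ++ PySem.Int.toStr i ++ "_" ++ f.1, (none : Option String)))).foldl
      (fun d p => d.insert p.1 p.2) fd
    = pvStep fd i PySem.Dict.empty := by
  rw [← pvBlock fd i PySem.Dict.empty]
  simp [PySem.Dict.getD_empty]

/-- The empty-hunters tail of B's recursion equals A's fill loop. -/
theorem pvNil : ∀ (m : Nat) (i : Int) (fd : PySem.Dict String (Option String)),
    (4 - i).toNat ≤ m →
    (pvRows [] i).foldl (fun d p => d.insert p.1 p.2) fd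
    = (PySem.List.pyRange i 4).foldl (fun fd j => pvStep fd j PySem.Dict.empty) fd := by
  intro m
  induction m with
  | zero =>
    intro i fd hm
    rw [pvRows, if_pos (by omega), PySem.List.pyRange_one_eq_nil (by omega)]
    simp
  | succ m ih =>
    intro i fd hm
    rw [pvRows]
    by_cases h : i > 3
    · rw [if_pos h, PySem.List.pyRange_one_eq_nil (by omega)]
      simp
    · rw [if_neg h, List.foldl_append, pvBlockNone,
          ih (i + 1) (pvStep fd i PySem.Dict.empty) (by omega)]
      conv_rhs => rw [PySem.List.pyRange_one_cons (show i < 4 by omega)]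
      simp

/-- Folding the inserts of B's pair list equals A's two loops over the same slots. -/
theorem pvMain : ∀ (hs : List (List (String × Option String))) (i : Int)
    (fd : PySem.Dict String (Option String)),
    (pvRows hs i).foldl (fun d p => d.insert p.1 p.2) fd
    = (PySem.List.pyRange (i + hs.length) 4).foldl (fun fd j => pvStep fd j PySem.Dict.empty)
        ((PySem.List.enumerate hs i).foldl
          (fun fd p => pvStep fd p.1 (PySem.Dict.ofList p.2)) fd) := by
  intro hs
  induction hs with
  | nil =>
    intro i fd
    rw [pvNil (4 - i).toNat i fd le_rfl]
    simp [PySem.List.enumerate_nil]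
  | cons h t iht =>
    intro i fd
    rw [pvRows, List.foldl_append, pvBlock, iht (i + 1) (pvStep fd i (PySem.Dict.ofList h))]
    rw [PySem.List.enumerate_cons]
    simp only [List.foldl_cons]
    have harg : (i + 1) + (t.length : Int) = i + ((h :: t).length : Int) := by
      push_cast [List.length_cons]; ring
    rw [harg]

/-- A unfolded: its two loops as `pvStep` folds. -/
theorem pvAeq (hunters : List (List (String × Option String))) :
    format_hunter_data_for_row hunters
    = ((PySem.List.pyRange ((hunters.length : Int) + 1) 4).foldl
        (fun fd j => pvStep fd j PySem.Dict.empty)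
        ((PySem.List.enumerate hunters 1).foldl
          (fun fd p => pvStep fd p.1 (PySem.Dict.ofList p.2)) PySem.Dict.empty)).items := rfl

-- ===== VERDICT (by name: the statement is the Claim_ definition above) =====
theorem format_hunter_data_for_row_spec : Claim_equal_format_hunter_data_for_row := by
  intro hunters _
  unfold Spec_format_hunter_data_for_row
  rw [pvAeq]
  show _ = (PySem.Dict.ofList (pvRows hunters 1)).items
  rw [show PySem.Dict.ofList (pvRows hunters 1)
      = (pvRows hunters 1).foldl (fun d p => d.insert p.1 p.2) PySem.Dict.empty from rfl,
    pvMain hunters 1 PySem.Dict.empty,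
    show ((1 : Int) + (hunters.length : Int)) = (hunters.length : Int) + 1 by ring]
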